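-- pv_equiv track=rewrite | github.com/zhangshiyunwlq/WLQ_LJC | wlq_rl_layout/write_json_test_wlq.py | cal_inner_space
-- ===== SOURCE A (Python) =====
-- from typing import List, Tuple, Dict, Any
--
-- def cal_inner_space(length: List[List[int]], width: List, location: List[List[int]], direction: str) -> List[
--     List[List[Tuple[int, int]]]]:
--     """计算内部空间坐标"""
--     room_width, _, _ = width
--     inner_space = []
--
--     for i, (floor_lengths, (x_start, y_start)) in enumerate(zip(length, location)):
--         floor_rooms = []
--         x_temp, y_temp = x_start, y_start
--
--         for room_length in floor_lengths:
--             if direction == "h":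
--                 coords = [
--                     (x_temp, y_temp),
--                     (x_temp + room_length, y_temp),
--                     (x_temp + room_length, y_temp + room_width[i]),
--                     (x_temp, y_temp + room_width[i])
--                 ]
--                 x_temp += room_length
--             else:  # direction == "v"
--                 coords = [
--                     (x_temp, y_temp),
--                     (x_temp + room_width[i], y_temp),
--                     (x_temp + room_width[i], y_temp + room_length),
--                     (x_temp, y_temp + room_length)
--                 ]
--                 y_temp += room_length
--
--             floor_rooms.append(coords)
--         inner_space.append(floor_rooms)
--
--     return inner_space
-- ===== SOURCE B (Python) =====
-- from typing import List, Tuple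
--
--
-- def cal_inner_space(length: List[List[int]], width: List, location: List[List[int]], direction: str) -> List[
--     List[List[Tuple[int, int]]]]:
--     room_width, _, _ = width
--     inner_space = []
--     for i, (floor_lengths, (x_start, y_start)) in enumerate(zip(length, location)):
--         base = x_start if direction == "h" else y_start
--         # start offset of each room along the accumulation axis, computed positionally
--         starts = [base + sum(floor_lengths[:j]) for j in range(len(floor_lengths))]
--         if direction == "h":
--             floor_rooms = [
--                 [(s, y_start), (s + L, y_start),
--                  (s + L, y_start + room_width[i]), (s, y_start + room_width[i])]
--                 for s, L in zip(starts, floor_lengths)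
--             ]
--         else:
--             floor_rooms = [
--                 [(x_start, s), (x_start + room_width[i], s),
--                  (x_start + room_width[i], s + L), (x_start, s + L)]
--                 for s, L in zip(starts, floor_lengths)
--             ]
--         inner_space.append(floor_rooms)
--     return inner_space
-- ===== Notes on version B (the rewrite author's own statement) =====
-- stated objective: alternative
-- what changed: Replaces the mutable running-coordinate accumulator with a positional formulation: each room's start offset is computed as the floor's prefix sum, and the corner lists are emitted by zip comprehensions per direction instead of an inner stateful loop.
import Mathlib
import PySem

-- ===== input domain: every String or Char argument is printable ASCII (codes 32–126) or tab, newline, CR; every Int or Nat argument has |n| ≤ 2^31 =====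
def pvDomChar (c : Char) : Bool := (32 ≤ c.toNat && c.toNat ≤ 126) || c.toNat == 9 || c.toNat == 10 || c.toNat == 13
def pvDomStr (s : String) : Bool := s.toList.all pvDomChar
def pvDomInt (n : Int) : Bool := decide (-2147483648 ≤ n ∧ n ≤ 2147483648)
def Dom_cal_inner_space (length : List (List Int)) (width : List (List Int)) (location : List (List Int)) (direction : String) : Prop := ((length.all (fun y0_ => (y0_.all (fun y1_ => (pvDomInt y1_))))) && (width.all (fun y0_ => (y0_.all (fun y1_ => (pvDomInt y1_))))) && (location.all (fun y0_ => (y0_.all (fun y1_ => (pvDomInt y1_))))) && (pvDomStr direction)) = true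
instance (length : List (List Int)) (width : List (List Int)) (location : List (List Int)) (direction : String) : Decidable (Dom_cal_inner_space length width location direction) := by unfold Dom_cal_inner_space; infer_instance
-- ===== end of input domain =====

-- B replaces A's mutable running-coordinate accumulator with per-room prefix-sum start
-- offsets and zip comprehensions per direction (objective: alternative decomposition).

-- ===== PORT A =====
-- inner loop of A: structural recursion over floor_lengths carrying the running (x_temp, y_temp)
def pvAFloor (lens : List Int) (x y rw : Int) (direction : String) : List (List (Int × Int)) :=
  match lens with
  | [] => []
  | L :: rest =>
    if direction == "h" then
      [(x, y), (x + L, y), (x + L, y + rw), (x, y + rw)] :: pvAFloor rest (x + L) y rw direction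
    else
      [(x, y), (x + rw, y), (x + rw, y + L), (x, y + L)] :: pvAFloor rest x (y + L) rw direction

-- outer loop of A: recursion over the zipped floors carrying the enumerate index i
def pvAFloors (pairs : List (List Int × List Int)) (i : Nat) (room_width : List Int) (direction : String) : List (List (List (Int × Int))) :=
  match pairs with
  | [] => []
  | (lens, loc) :: rest =>
    pvAFloor lens (loc.getD 0 0) (loc.getD 1 0) ((PySem.List.pyGet? room_width (Int.ofNat i)).getD 0) direction
      :: pvAFloors rest (i + 1) room_width direction

def cal_inner_space (length : List (List Int)) (width : List (List Int)) (location : List (List Int)) (direction : String) : List (List (List (Int × Int))) :=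
  pvAFloors (length.zip location) 0 (width.getD 0 []) direction

-- ===== PORT B =====
-- one floor of B: prefix-sum start offsets, then a zip comprehension per direction
def pvBFloor (lens : List Int) (x0 y0 rw : Int) (direction : String) : List (List (Int × Int)) :=
  let base := if direction == "h" then x0 else y0
  let starts := (List.range lens.length).map (fun j => base + ((lens.take j).sum))
  if direction == "h" then
    (starts.zip lens).map (fun p => [(p.1, y0), (p.1 + p.2, y0), (p.1 + p.2, y0 + rw), (p.1, y0 + rw)])
  else
    (starts.zip lens).map (fun p => [(x0, p.1), (x0 + rw, p.1), (x0 + rw, p.1 + p.2), (x0, p.1 + p.2)])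

def cal_inner_space_alt (length : List (List Int)) (width : List (List Int)) (location : List (List Int)) (direction : String) : List (List (List (Int × Int))) :=
  let room_width := width.getD 0 []
  (PySem.List.enumerate (length.zip location)).map (fun e =>
    pvBFloor e.2.1 (e.2.2.getD 0 0) (e.2.2.getD 1 0) ((PySem.List.pyGet? room_width e.1).getD 0) direction)

-- ===== PRECONDITION & SPEC =====
-- Pre_ excludes exactly the inputs on which the Python A raises: a width that is not a
-- 3-tuple unpack, a zipped location entry that is not a pair, and a floor with rooms whose
-- enumerate index falls outside room_width (IndexError).
def Pre_cal_inner_space (length : List (List Int)) (width : List (List Int)) (location : List (List Int)) (direction : String) : Prop :=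
  width.length = 3 ∧
  (∀ p ∈ location.take length.length, p.length = 2) ∧
  (∀ i : Nat, i < min length.length location.length →
     (length.getD i []) ≠ [] → i < (width.getD 0 []).length)
instance (length : List (List Int)) (width : List (List Int)) (location : List (List Int)) (direction : String) : Decidable (Pre_cal_inner_space length width location direction) := by unfold Pre_cal_inner_space; infer_instance

def pvWitness_cal_inner_space : List (List Int) × List (List Int) × List (List Int) × String :=
  ([[1, 2], [3]], [[5, 6], [], []], [[0, 0], [10, 20]], "h")

def Spec_cal_inner_space (length : List (List Int)) (width : List (List Int)) (location : List (List Int)) (direction : String) (out : List (List (List (Int × Int)))) : Prop := out = cal_inner_space_alt length width location direction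
instance (length : List (List Int)) (width : List (List Int)) (location : List (List Int)) (direction : String) (out : List (List (List (Int × Int)))) : Decidable (Spec_cal_inner_space length width location direction out) := by unfold Spec_cal_inner_space; infer_instance

-- ===== CLAIM (what is proved, stated in full; the proofs are below) =====
def Claim_equal_cal_inner_space : Prop := ∀ (length : List (List Int)) (width : List (List Int)) (location : List (List Int)) (direction : String), Dom_cal_inner_space length width location direction → Pre_cal_inner_space length width location direction → Spec_cal_inner_space length width location direction (cal_inner_space length width location direction)

-- ===== LEMMAS AND PROOFS =====

theorem pvFloor_eq (lens : List Int) (x0 y0 rw : Int) (direction : String) :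
    pvAFloor lens x0 y0 rw direction = pvBFloor lens x0 y0 rw direction := by
  unfold pvBFloor
  by_cases h : direction == "h"
  · simp only [h, if_true]
    induction lens generalizing x0 with
    | nil => simp [pvAFloor]
    | cons L rest ih =>
      simp only [pvAFloor, h, if_true, List.length_cons, List.range_succ_eq_map,
        List.map_cons, List.map_map, List.zip_cons_cons, List.map_cons, List.cons.injEq]
      refine ⟨by simp, ?_⟩
      rw [ih (x0 + L)]
      congr 1
      congr 1
      apply List.map_congr_left
      intro j _
      simp [List.sum_cons]
      ring
  · simp only [h, Bool.false_eq_true, if_false]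
    induction lens generalizing y0 with
    | nil => simp [pvAFloor]
    | cons L rest ih =>
      simp only [pvAFloor, h, Bool.false_eq_true, if_false, List.length_cons,
        List.range_succ_eq_map, List.map_cons, List.map_map, List.zip_cons_cons,
        List.map_cons, List.cons.injEq]
      refine ⟨by simp, ?_⟩
      rw [ih (y0 + L)]
      congr 1
      congr 1
      apply List.map_congr_left
      intro j _
      simp [List.sum_cons]
      ring

theorem pvFloors_eq (pairs : List (List Int × List Int)) (i : Nat) (room_width : List Int) (direction : String) :
    pvAFloors pairs i room_width direction =
      (PySem.List.enumerate pairs (Int.ofNat i)).map (fun e =>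
        pvBFloor e.2.1 (e.2.2.getD 0 0) (e.2.2.getD 1 0)
          ((PySem.List.pyGet? room_width e.1).getD 0) direction) := by
  induction pairs generalizing i with
  | nil => simp [pvAFloors, PySem.List.enumerate_nil]
  | cons p rest ih =>
    obtain ⟨lens, loc⟩ := p
    rw [pvAFloors, PySem.List.enumerate_cons, List.map_cons]
    refine congrArg₂ _ (pvFloor_eq ..) ?_
    rw [ih (i + 1)]
    congr 1

-- ===== VERDICT (by name: the statement is the Claim_ definition above) =====
theorem cal_inner_space_spec : Claim_equal_cal_inner_space := by
  intro length width location direction _ _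
  unfold Spec_cal_inner_space cal_inner_space cal_inner_space_alt
  exact pvFloors_eq (length.zip location) 0 (width.getD 0 []) direction
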